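-- pv_equiv track=rewrite | github.com/zwala/Pro_Euler | codingBat_Logic2.py | make_chocolate
-- ===== SOURCE A (Python) =====
-- def make_chocolate(small,big,goal):
--     consider_big=big
--     while consider_big*5 >goal:
--         consider_big-=1
--     num=goal-(consider_big*5)
--     if num<=small:
--         return num
--     else:
--         return -1
-- ===== SOURCE B (Python) =====
-- def make_chocolate(small, big, goal):
--     consider_big = min(big, goal // 5)
--     num = goal - 5 * consider_big
--     return num if num <= small else -1
-- ===== Notes on version B (the rewrite author's own statement) =====
-- stated objective: faster
-- what changed: Replaces the while-loop that decrements consider_big one step at a time with the closed form min(big, goal//5) and a single arithmetic check.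
import Mathlib
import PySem

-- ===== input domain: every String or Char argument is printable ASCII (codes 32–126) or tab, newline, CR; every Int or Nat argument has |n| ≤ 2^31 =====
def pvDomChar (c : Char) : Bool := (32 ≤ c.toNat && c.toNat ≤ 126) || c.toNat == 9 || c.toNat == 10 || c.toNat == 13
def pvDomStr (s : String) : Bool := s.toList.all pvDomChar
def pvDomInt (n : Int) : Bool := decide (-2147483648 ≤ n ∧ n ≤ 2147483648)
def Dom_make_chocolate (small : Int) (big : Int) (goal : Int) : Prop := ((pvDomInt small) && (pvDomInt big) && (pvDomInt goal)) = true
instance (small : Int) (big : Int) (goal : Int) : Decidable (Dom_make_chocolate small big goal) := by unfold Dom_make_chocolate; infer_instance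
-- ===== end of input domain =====

-- ===== PORT A =====
-- B is the closed-form O(1) rewrite of A's decrementing while-loop; return values proved equal on all of Dom.
-- while consider_big*5 > goal: consider_big -= 1
def mcLoop (goal : Int) (c : Int) : Int :=
  if c * 5 > goal then mcLoop goal (c - 1) else c
  termination_by (c * 5 - goal).toNat
  decreasing_by omega

def make_chocolate (small : Int) (big : Int) (goal : Int) : Int :=
  let consider_big := mcLoop goal big
  let num := goal - consider_big * 5
  if num ≤ small then num else -1

-- ===== PORT B =====
def make_chocolate_alt (small : Int) (big : Int) (goal : Int) : Int :=
  let consider_big := min big (PySem.Int.floordiv goal 5)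
  let num := goal - 5 * consider_big
  if num ≤ small then num else -1

-- ===== PRECONDITION & SPEC =====
def Spec_make_chocolate (small : Int) (big : Int) (goal : Int) (out : Int) : Prop := out = make_chocolate_alt small big goal
instance (small : Int) (big : Int) (goal : Int) (out : Int) : Decidable (Spec_make_chocolate small big goal out) := by unfold Spec_make_chocolate; infer_instance

-- ===== CLAIM (what is proved, stated in full; the proofs are below) =====
def Claim_equal_make_chocolate : Prop := ∀ (small : Int) (big : Int) (goal : Int), Dom_make_chocolate small big goal → Spec_make_chocolate small big goal (make_chocolate small big goal)

-- ===== LEMMAS AND PROOFS =====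
theorem mcLoop_eq (goal c : Int) : mcLoop goal c = min c (PySem.Int.floordiv goal 5) := by
  rw [show PySem.Int.floordiv goal 5 = goal / 5 from
    PySem.Int.floordiv_eq_ediv_of_pos (by norm_num)]
  fun_induction mcLoop goal c with
  | case1 c h ih =>
      rw [ih]
      have := Int.ediv_add_emod goal 5
      have := Int.emod_nonneg goal (show (5:Int) ≠ 0 by norm_num)
      omega
  | case2 c h =>
      have := Int.ediv_add_emod goal 5
      have h2 := Int.emod_lt_of_pos goal (show (0:Int) < 5 by norm_num)
      omega

-- ===== VERDICT (by name: the statement is the Claim_ definition above) =====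
theorem make_chocolate_spec : Claim_equal_make_chocolate := by
  intro small big goal _
  unfold Spec_make_chocolate make_chocolate make_chocolate_alt
  rw [mcLoop_eq]
  ring_nf
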